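-- pv_equiv track=rewrite | github.com/getzep/graphiti | truth/candidates.py | classify_risk_level
-- ===== SOURCE A (Python) =====
-- CORE_TRUTH_PREFIXES = (
--     "identity.",
--     "relationship.",
--     "legal.",
--     "finance.",
--     "security.",
--     "health.",
-- )
--
-- LOW_RISK_PREFIXES = (
--     "pref.",
--     "style.",
-- )
--
-- def classify_risk_level(predicate: str) -> str:
--     p = (predicate or "").strip()
--     for pref in CORE_TRUTH_PREFIXES:
--         if p.startswith(pref):
--             return "high"
--     for pref in LOW_RISK_PREFIXES:
--         if p.startswith(pref):
--             return "low"
--     return "medium"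
-- ===== SOURCE B (Python) =====
-- _RISK_BY_NAMESPACE = {
--     "identity": "high",
--     "relationship": "high",
--     "legal": "high",
--     "finance": "high",
--     "security": "high",
--     "health": "high",
--     "pref": "low",
--     "style": "low",
-- }
--
-- def classify_risk_level(predicate: str) -> str:
--     p = (predicate or "").strip()
--     i = p.find(".")
--     if i == -1:
--         return "medium"
--     return _RISK_BY_NAMESPACE.get(p[:i], "medium")
-- ===== Notes on version B (the rewrite author's own statement) =====
-- stated objective: idiomatic
-- what changed: Replaces the two sequential prefix-scanning loops with one namespace extraction (text before the first dot) and a single dict lookup in a module-level risk table.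
import Mathlib
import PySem

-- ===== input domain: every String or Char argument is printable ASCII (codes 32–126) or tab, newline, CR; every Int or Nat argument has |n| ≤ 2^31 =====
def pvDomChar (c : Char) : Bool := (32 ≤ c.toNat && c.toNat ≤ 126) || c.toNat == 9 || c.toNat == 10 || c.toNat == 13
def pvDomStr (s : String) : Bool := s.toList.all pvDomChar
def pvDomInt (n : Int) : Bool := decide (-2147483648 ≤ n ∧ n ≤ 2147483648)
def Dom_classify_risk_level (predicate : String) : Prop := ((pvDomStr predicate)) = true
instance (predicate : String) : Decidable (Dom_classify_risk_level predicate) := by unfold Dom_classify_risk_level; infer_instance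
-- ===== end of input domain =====

-- B replaces A's two sequential prefix-scanning loops with one namespace extraction
-- (text before the first dot) and a single dict lookup (objective: idiomatic).

-- ===== PORT A =====
def CORE_TRUTH_PREFIXES : List String :=
  ["identity.", "relationship.", "legal.", "finance.", "security.", "health."]

def LOW_RISK_PREFIXES : List String := ["pref.", "style."]

def classify_risk_level (predicate : String) : String :=
  let p := PySem.Str.strip (if predicate = "" then "" else predicate)
  if CORE_TRUTH_PREFIXES.any (fun pref => PySem.Str.startswith p pref) then "high"
  else if LOW_RISK_PREFIXES.any (fun pref => PySem.Str.startswith p pref) then "low"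
  else "medium"

-- ===== PORT B =====
def RISK_BY_NAMESPACE : PySem.Dict String String :=
  PySem.Dict.ofList
    [("identity", "high"), ("relationship", "high"), ("legal", "high"),
     ("finance", "high"), ("security", "high"), ("health", "high"),
     ("pref", "low"), ("style", "low")]

def classify_risk_level_alt (predicate : String) : String :=
  let p := PySem.Str.strip (if predicate = "" then "" else predicate)
  let i := PySem.Str.find p "."
  if i = -1 then "medium"
  else PySem.Dict.getD RISK_BY_NAMESPACE (PySem.Str.slice p none (some i)) "medium"

-- ===== PRECONDITION & SPEC =====
def Spec_classify_risk_level (predicate : String) (out : String) : Prop := out = classify_risk_level_alt predicate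
instance (predicate : String) (out : String) : Decidable (Spec_classify_risk_level predicate out) := by unfold Spec_classify_risk_level; infer_instance

-- ===== CLAIM (what is proved, stated in full; the proofs are below) =====
def Claim_equal_classify_risk_level : Prop := ∀ (predicate : String), Dom_classify_risk_level predicate → Spec_classify_risk_level predicate (classify_risk_level predicate)

-- ===== LEMMAS AND PROOFS =====

lemma singleton_prefix_iff (a : Char) (l : List Char) : [a] <+: l ↔ l.head? = some a := by
  cases l with
  | nil => simp
  | cons b t => simp [List.cons_prefix_cons, eq_comm]

-- if the prefix contains a dot but the string has none, startswith is false
lemma sw_false (cs pre : List Char) (hd : '.' ∈ pre)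
    (hf : PySem.Chars.find cs ['.'] = -1) :
    PySem.Chars.startswith cs pre = false := by
  by_contra h
  rw [Bool.not_eq_false, PySem.Chars.startswith_iff] at h
  exact (PySem.Chars.find_eq_neg_one_iff cs ['.']).mp hf
    ((List.singleton_infix_iff '.' cs).mpr (h.subset hd))

-- when the first dot of cs is at index k, cs starts with ns ++ "." iff its first k chars are ns
lemma sw_iff (cs ns : List Char) (hdot : '.' ∉ ns) (k : ℕ)
    (hk : PySem.Chars.find cs ['.'] = (k : ℤ)) :
    (PySem.Chars.startswith cs (ns ++ ['.']) = true ↔ cs.take k = ns) := by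
  have h0 : (0 : ℤ) ≤ PySem.Chars.find cs ['.'] := by omega
  obtain ⟨h1, h2⟩ := PySem.Chars.find_spec h0
  rw [hk] at h1 h2
  simp only [Int.toNat_natCast] at h1 h2
  have h1' : cs[k]? = some '.' := by
    rw [← List.head?_drop]; exact (singleton_prefix_iff '.' _).mp h1
  have h2' : ∀ i < k, cs[i]? ≠ some '.' := by
    intro i hi hc
    exact h2 i hi ((singleton_prefix_iff '.' _).mpr (by rw [List.head?_drop]; exact hc))
  rw [PySem.Chars.startswith_iff]
  constructor
  · intro hp
    have hm : ns ++ ['.'] = cs.take (ns.length + 1) := by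
      have := List.prefix_iff_eq_take.mp hp; simpa using this
    have hmk : cs[ns.length]? = some '.' := by
      have : (cs.take (ns.length + 1))[ns.length]? = some '.' := by
        rw [← hm]; simp
      simpa [List.getElem?_take] using this
    have hkm : ¬ ns.length < k := fun hlt => h2' ns.length hlt hmk
    have hne : ¬ k < ns.length := by
      intro hlt
      have : cs[k]? = ns[k]? := by
        have : (cs.take (ns.length + 1))[k]? = (ns ++ ['.'])[k]? := by rw [hm]
        rw [List.getElem?_take_of_lt (by omega), List.getElem?_append_left hlt] at this
        exact this
      rw [h1'] at this
      exact hdot (by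
        have := List.getElem?_eq_some_iff.mp this.symm
        obtain ⟨hlen, he⟩ := this
        exact he ▸ List.getElem_mem hlen)
    have hkeq : k = ns.length := by omega
    have : cs.take ns.length = ns := by
      have := (List.prefix_iff_eq_take.mp ((List.prefix_append ns ['.']).trans hp)).symm
      exact this
    rw [hkeq]; exact this
  · intro ht
    obtain ⟨t, htl⟩ := h1
    refine ⟨t, ?_⟩
    calc ns ++ ['.'] ++ t = cs.take k ++ (['.'] ++ t) := by rw [ht]; simp
      _ = cs.take k ++ cs.drop k := by rw [htl]
      _ = cs := List.take_append_drop k cs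

-- the two bodies agree on every intermediate string p
set_option maxHeartbeats 1000000 in
lemma body_eq (p : String) :
    (if CORE_TRUTH_PREFIXES.any (fun pref => PySem.Str.startswith p pref) then "high"
     else if LOW_RISK_PREFIXES.any (fun pref => PySem.Str.startswith p pref) then "low"
     else "medium")
    = (let i := PySem.Str.find p "."
       if i = -1 then "medium"
       else PySem.Dict.getD RISK_BY_NAMESPACE (PySem.Str.slice p none (some i)) "medium") := by
  have hfind : PySem.Str.find p "." = PySem.Chars.find p.toList ['.'] := by
    simp [PySem.Str.find_eq]
  rcases Int.le_iff_lt_or_eq.mp (PySem.Chars.neg_one_le_find p.toList ['.']) with hlt | heq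
  · -- a dot occurs: find = k ≥ 0
    obtain ⟨k, hk⟩ : ∃ k : ℕ, PySem.Chars.find p.toList ['.'] = (k : ℤ) :=
      ⟨(PySem.Chars.find p.toList ['.']).toNat, by omega⟩
    have hkey : (PySem.Str.slice p none (some (PySem.Str.find p "."))).toList = p.toList.take k := by
      rw [PySem.Str.toList_slice, hfind, hk, PySem.Chars.slice_eq_listSlice,
        PySem.List.slice_to_natCast]
    have hne : ¬ PySem.Str.find p "." = -1 := by rw [hfind, hk]; omega
    simp only [CORE_TRUTH_PREFIXES, LOW_RISK_PREFIXES, List.any_cons, List.any_nil,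
      Bool.or_false, hne, if_false]
    have sw : ∀ ns : List Char, '.' ∉ ns →
        (PySem.Chars.startswith p.toList (ns ++ ['.']) = (p.toList.take k == ns)) := by
      intro ns hd
      rw [Bool.eq_iff_iff, sw_iff p.toList ns hd k hk]
      simp
    have conv : ∀ s : String, PySem.Str.startswith p s = PySem.Chars.startswith p.toList s.toList := by
      intro s; simp [PySem.Str.startswith_eq]
    rw [conv "identity.", conv "relationship.", conv "legal.", conv "finance.",
      conv "security.", conv "health.", conv "pref.", conv "style."]
    have e1 : ("identity.").toList = "identity".toList ++ ['.'] := by decide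
    have e2 : ("relationship.").toList = "relationship".toList ++ ['.'] := by decide
    have e3 : ("legal.").toList = "legal".toList ++ ['.'] := by decide
    have e4 : ("finance.").toList = "finance".toList ++ ['.'] := by decide
    have e5 : ("security.").toList = "security".toList ++ ['.'] := by decide
    have e6 : ("health.").toList = "health".toList ++ ['.'] := by decide
    have e7 : ("pref.").toList = "pref".toList ++ ['.'] := by decide
    have e8 : ("style.").toList = "style".toList ++ ['.'] := by decide
    rw [e1, e2, e3, e4, e5, e6, e7, e8,
      sw _ (by decide), sw _ (by decide), sw _ (by decide), sw _ (by decide),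
      sw _ (by decide), sw _ (by decide), sw _ (by decide), sw _ (by decide)]
    -- right side: unfold the literal dict into its lookup chain, compare keys via toList
    have keyeq : ∀ s : String, ((s == PySem.Str.slice p none (some (PySem.Str.find p "."))))
        = (p.toList.take k == s.toList) := by
      intro s
      rw [Bool.eq_iff_iff]
      simp only [beq_iff_eq]
      constructor
      · intro hc; rw [hc, hkey]
      · intro hc
        exact String.toList_inj.mp (by rw [hkey, hc])
    have hdict : RISK_BY_NAMESPACE = PySem.Dict.mk
        [("identity", "high"), ("relationship", "high"), ("legal", "high"),
         ("finance", "high"), ("security", "high"), ("health", "high"),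
         ("pref", "low"), ("style", "low")] := by decide
    rw [hdict]
    simp only [PySem.Dict.getD, PySem.Dict.get?_mk_cons]
    rw [keyeq "identity", keyeq "relationship", keyeq "legal", keyeq "finance",
      keyeq "security", keyeq "health", keyeq "pref", keyeq "style"]
    have d1 : ("identity").toList = ['i','d','e','n','t','i','t','y'] := by decide
    have d2 : ("relationship").toList = ['r','e','l','a','t','i','o','n','s','h','i','p'] := by decide
    have d3 : ("legal").toList = ['l','e','g','a','l'] := by decide
    have d4 : ("finance").toList = ['f','i','n','a','n','c','e'] := by decide
    have d5 : ("security").toList = ['s','e','c','u','r','i','t','y'] := by decide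
    have d6 : ("health").toList = ['h','e','a','l','t','h'] := by decide
    have d7 : ("pref").toList = ['p','r','e','f'] := by decide
    have d8 : ("style").toList = ['s','t','y','l','e'] := by decide
    rw [d1, d2, d3, d4, d5, d6, d7, d8]
    by_cases c1 : p.toList.take k = ['i','d','e','n','t','i','t','y']
    · simp [c1]
    by_cases c2 : p.toList.take k = ['r','e','l','a','t','i','o','n','s','h','i','p']
    · simp [c2]
    by_cases c3 : p.toList.take k = ['l','e','g','a','l']
    · simp [c3]
    by_cases c4 : p.toList.take k = ['f','i','n','a','n','c','e']
    · simp [c4]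
    by_cases c5 : p.toList.take k = ['s','e','c','u','r','i','t','y']
    · simp [c5]
    by_cases c6 : p.toList.take k = ['h','e','a','l','t','h']
    · simp [c6]
    by_cases c7 : p.toList.take k = ['p','r','e','f']
    · simp [c7]
    by_cases c8 : p.toList.take k = ['s','t','y','l','e']
    · simp [c8]
    simp [c1, c2, c3, c4, c5, c6, c7, c8, PySem.Dict.get?]
  · -- no dot anywhere: every prefix test is false, and B takes the -1 branch
    have hf : PySem.Chars.find p.toList ['.'] = -1 := heq.symm
    have he : PySem.Str.find p "." = -1 := by rw [hfind, hf]
    simp only [CORE_TRUTH_PREFIXES, LOW_RISK_PREFIXES, List.any_cons, List.any_nil,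
      Bool.or_false, he]
    have conv : ∀ s : String, '.' ∈ s.toList → PySem.Str.startswith p s = false := by
      intro s hd
      rw [PySem.Str.startswith_eq]
      exact sw_false p.toList s.toList hd hf
    rw [conv "identity." (by decide), conv "relationship." (by decide), conv "legal." (by decide),
      conv "finance." (by decide), conv "security." (by decide), conv "health." (by decide),
      conv "pref." (by decide), conv "style." (by decide)]
    simp

-- ===== VERDICT (by name: the statement is the Claim_ definition above) =====
theorem classify_risk_level_spec : Claim_equal_classify_risk_level := by
  intro predicate _
  unfold Spec_classify_risk_level classify_risk_level classify_risk_level_alt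
  exact body_eq _
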